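-- pv_equiv track=rewrite | github.com/CesarTaco1007/IST-105_Assignment6 | bitwise_operations.py | perform_bitwise_operations
-- ===== SOURCE A (Python) =====
-- def perform_bitwise_operations(numbers):
--     if not numbers:
--         return 0, 0, 0
--     result_and = numbers[0]
--     result_or = numbers[0]
--     result_xor = numbers[0]
--     for num in numbers[1:]:
--         result_and &= num
--         result_or |= num
--         result_xor ^= num
--     return result_and, result_or, result_xor
-- ===== SOURCE B (Python) =====
-- def perform_bitwise_operations(numbers):
--     if not numbers:
--         return 0, 0, 0
--
--     def solve(lo, hi):
--         # reductions of numbers[lo:hi], hi > lo, by divide and conquer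
--         if hi - lo == 1:
--             x = numbers[lo]
--             return x, x, x
--         mid = (lo + hi) // 2
--         a1, o1, x1 = solve(lo, mid)
--         a2, o2, x2 = solve(mid, hi)
--         return a1 & a2, o1 | o2, x1 ^ x2
--
--     return solve(0, len(numbers))
-- ===== Notes on version B (the rewrite author's own statement) =====
-- stated objective: alternative
-- what changed: Replaces A's single left-to-right loop with three accumulators by a recursive divide-and-conquer that splits the list in half, reduces each half, and combines the two triples with &,|,^ (correct because the three operators are associative).
import Mathlib
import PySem

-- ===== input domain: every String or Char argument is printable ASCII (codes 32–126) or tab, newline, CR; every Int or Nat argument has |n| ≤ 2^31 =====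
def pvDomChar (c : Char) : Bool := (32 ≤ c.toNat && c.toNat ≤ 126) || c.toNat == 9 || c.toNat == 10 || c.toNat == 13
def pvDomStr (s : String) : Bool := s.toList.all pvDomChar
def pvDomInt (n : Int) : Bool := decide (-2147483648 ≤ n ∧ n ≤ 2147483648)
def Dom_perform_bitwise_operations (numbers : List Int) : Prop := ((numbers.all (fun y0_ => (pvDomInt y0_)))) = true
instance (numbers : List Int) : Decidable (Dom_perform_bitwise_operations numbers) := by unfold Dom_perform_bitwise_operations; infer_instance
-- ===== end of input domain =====

-- B replaces A's single three-accumulator loop by a divide-and-conquer reduction (alternative; same cost).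
-- ===== PORT A =====
-- literal port of A: empty guard, then one loop over numbers[1:] carrying three accumulators
def perform_bitwise_operations (numbers : List Int) : Int × Int × Int :=
  match numbers with
  | [] => (0, 0, 0)
  | h :: _ =>
    (PySem.List.slice numbers (some 1) none).foldl
      (fun acc num =>
        (PySem.Int.band acc.1 num, PySem.Int.bor acc.2.1 num, PySem.Int.bxor acc.2.2 num))
      (h, h, h)

-- ===== PORT B =====
-- port of B's solve(lo, hi): the slice numbers[lo:hi] is carried as the sublist itself; a
-- one-element slice yields (x, x, x), otherwise split at the midpoint, recurse, combine with &,|,^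
def pvSolve (xs : List Int) : Int × Int × Int :=
  match xs with
  | [] => (0, 0, 0)   -- unreachable: solve is only called with hi > lo
  | [x] => (x, x, x)
  | a :: b :: rest =>
    let l := pvSolve ((a :: b :: rest).take ((rest.length + 2) / 2))
    let r := pvSolve ((a :: b :: rest).drop ((rest.length + 2) / 2))
    (PySem.Int.band l.1 r.1, PySem.Int.bor l.2.1 r.2.1, PySem.Int.bxor l.2.2 r.2.2)
termination_by xs.length
decreasing_by
  all_goals (simp [List.length_take, List.length_drop]; try omega)

def perform_bitwise_operations_alt (numbers : List Int) : Int × Int × Int :=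
  match numbers with
  | [] => (0, 0, 0)
  | _ => pvSolve numbers

-- ===== PRECONDITION & SPEC =====
def Spec_perform_bitwise_operations (numbers : List Int) (out : Int × Int × Int) : Prop := out = perform_bitwise_operations_alt numbers
instance (numbers : List Int) (out : Int × Int × Int) : Decidable (Spec_perform_bitwise_operations numbers out) := by unfold Spec_perform_bitwise_operations; infer_instance

-- ===== CLAIM (what is proved, stated in full; the proofs are below) =====
def Claim_equal_perform_bitwise_operations : Prop := ∀ (numbers : List Int), Dom_perform_bitwise_operations numbers → Spec_perform_bitwise_operations numbers (perform_bitwise_operations numbers)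

-- ===== LEMMAS AND PROOFS =====

-- Nat fact behind the band/bor bridges: the bits of m &&& n and of m.ldiff n partition those of m
theorem pv_and_add_ldiff : ∀ (m : Nat), ∀ (n : Nat), (m &&& n) + Nat.ldiff m n = m := by
  intro m
  induction m using Nat.binaryRec with
  | zero => intro n; simp [Nat.ldiff]
  | bit b m ih =>
    intro n
    rw [← Nat.bit_bodd_div2 n, Nat.land_bit, Nat.ldiff_bit, Nat.bit_val, Nat.bit_val, Nat.bit_val]
    have := ih n.div2
    cases b <;> cases hb : n.bodd <;> simp <;> omega

theorem pv_sub_and_eq_ldiff (m n : Nat) : m - (m &&& n) = Nat.ldiff m n := by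
  have := pv_and_add_ldiff m n; omega

-- bridges from PySem's two's-complement formulas to Mathlib's Int.land/lor/xor
theorem pv_band_eq (a b : Int) : PySem.Int.band a b = Int.land a b := by
  have h1 : ∀ n : Nat, ¬((n : Int) ≤ -1) := by intro n; omega
  cases a with
  | ofNat m => cases b with
    | ofNat n => simp [PySem.Int.band, Int.land]
    | negSucc n => simp [PySem.Int.band, Int.land, Int.negSucc_eq, h1, pv_sub_and_eq_ldiff]
  | negSucc m => cases b with
    | ofNat n => simp [PySem.Int.band, Int.land, Int.negSucc_eq, h1, pv_sub_and_eq_ldiff]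
    | negSucc n => simp [PySem.Int.band, Int.land, Int.negSucc_eq, h1]; ring

theorem pv_bor_eq (a b : Int) : PySem.Int.bor a b = Int.lor a b := by
  have h1 : ∀ n : Nat, ¬((n : Int) ≤ -1) := by intro n; omega
  cases a with
  | ofNat m => cases b with
    | ofNat n => simp [PySem.Int.bor, Int.lor]
    | negSucc n => simp [PySem.Int.bor, Int.lor, Int.negSucc_eq, h1, pv_sub_and_eq_ldiff]; ring
  | negSucc m => cases b with
    | ofNat n => simp [PySem.Int.bor, Int.lor, Int.negSucc_eq, h1, pv_sub_and_eq_ldiff]; ring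
    | negSucc n => simp [PySem.Int.bor, Int.lor, Int.negSucc_eq, h1]; ring

theorem pv_bxor_eq (a b : Int) : PySem.Int.bxor a b = Int.xor a b := by
  have h1 : ∀ n : Nat, ¬((n : Int) ≤ -1) := by intro n; omega
  cases a with
  | ofNat m => cases b with
    | ofNat n => simp [PySem.Int.bxor, Int.xor]
    | negSucc n => simp [PySem.Int.bxor, Int.xor, Int.negSucc_eq, h1]; ring
  | negSucc m => cases b with
    | ofNat n => simp [PySem.Int.bxor, Int.xor, Int.negSucc_eq, h1]; ring
    | negSucc n => simp [PySem.Int.bxor, Int.xor, Int.negSucc_eq, h1]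

-- extensionality of Int by test bits
theorem pv_int_ext (a b : Int) (h : ∀ i, a.testBit i = b.testBit i) : a = b := by
  cases a with
  | ofNat m => cases b with
    | ofNat n =>
      have : m = n := Nat.eq_of_testBit_eq (by intro i; simpa [Int.testBit] using h i)
      simp [this]
    | negSucc n =>
      exfalso
      have hi := h (m + n)
      have h1 : Nat.testBit m (m + n) = false :=
        Nat.testBit_eq_false_of_lt (lt_of_lt_of_le m.lt_two_pow_self (Nat.pow_le_pow_right (by norm_num) (by omega)))
      have h2 : Nat.testBit n (m + n) = false :=
        Nat.testBit_eq_false_of_lt (lt_of_lt_of_le n.lt_two_pow_self (Nat.pow_le_pow_right (by norm_num) (by omega)))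
      simp [Int.testBit, h1, h2] at hi
  | negSucc m => cases b with
    | ofNat n =>
      exfalso
      have hi := h (m + n)
      have h1 : Nat.testBit m (m + n) = false :=
        Nat.testBit_eq_false_of_lt (lt_of_lt_of_le m.lt_two_pow_self (Nat.pow_le_pow_right (by norm_num) (by omega)))
      have h2 : Nat.testBit n (m + n) = false :=
        Nat.testBit_eq_false_of_lt (lt_of_lt_of_le n.lt_two_pow_self (Nat.pow_le_pow_right (by norm_num) (by omega)))
      simp [Int.testBit, h1, h2] at hi
    | negSucc n =>
      have : m = n := Nat.eq_of_testBit_eq (by intro i; simpa [Int.testBit] using h i)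
      simp [this]

-- associativity of the three operators
theorem pv_band_assoc (a b c : Int) :
    PySem.Int.band (PySem.Int.band a b) c = PySem.Int.band a (PySem.Int.band b c) := by
  simp only [pv_band_eq]
  apply pv_int_ext; intro i
  simp [Int.testBit_land, Bool.and_assoc]

theorem pv_bor_assoc (a b c : Int) :
    PySem.Int.bor (PySem.Int.bor a b) c = PySem.Int.bor a (PySem.Int.bor b c) := by
  simp only [pv_bor_eq]
  apply pv_int_ext; intro i
  simp [Int.testBit_lor, Bool.or_assoc]

theorem pv_bxor_assoc (a b c : Int) :
    PySem.Int.bxor (PySem.Int.bxor a b) c = PySem.Int.bxor a (PySem.Int.bxor b c) := by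
  simp only [pv_bxor_eq]
  apply pv_int_ext; intro i
  simp [Int.testBit_lxor]

-- folding an associative operator: pull the seed out
theorem pv_foldl_assoc (op : Int → Int → Int)
    (hA : ∀ a b c, op (op a b) c = op a (op b c)) :
    ∀ (t : List Int) (a b : Int), t.foldl op (op a b) = op a (t.foldl op b) := by
  intro t
  induction t with
  | nil => intro a b; rfl
  | cons x xs ih => intro a b; simp only [List.foldl]; rw [hA, ih]

-- reduction of a concatenation of two nonempty lists combines the two reductions
theorem pv_red_append (op : Int → Int → Int)
    (hA : ∀ a b c, op (op a b) c = op a (op b c))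
    (x : Int) (xt : List Int) (y : Int) (yt : List Int) :
    (xt ++ y :: yt).foldl op x = op (xt.foldl op x) (yt.foldl op y) := by
  rw [List.foldl_append]
  simp only [List.foldl]
  exact pv_foldl_assoc op hA yt (xt.foldl op x) y

-- A's three-accumulator fold splits into three independent folds
theorem pv_fold3 (t : List Int) (a b c : Int) :
    t.foldl (fun acc num =>
        (PySem.Int.band acc.1 num, PySem.Int.bor acc.2.1 num, PySem.Int.bxor acc.2.2 num)) (a, b, c)
      = (t.foldl PySem.Int.band a, t.foldl PySem.Int.bor b, t.foldl PySem.Int.bxor c) := by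
  induction t generalizing a b c with
  | nil => rfl
  | cons x xs ih => simp [List.foldl, ih]

-- the divide-and-conquer computes the three left-fold reductions
theorem pv_pvSolve_spec (xs : List Int) :
    ∀ h t, xs = h :: t →
      pvSolve xs = (t.foldl PySem.Int.band h, t.foldl PySem.Int.bor h, t.foldl PySem.Int.bxor h) := by
  induction xs using pvSolve.induct with
  | case1 => intro h t hxs; cases hxs
  | case2 x => intro h t hxs; cases hxs; simp [pvSolve]
  | case3 a b rest ihl ihr =>
    intro h t hxs
    cases hxs
    have hm1 : 1 ≤ (rest.length + 2) / 2 := by omega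
    have hm2 : (rest.length + 2) / 2 < rest.length + 2 := by omega
    obtain ⟨y, yt, hdrop⟩ :
        ∃ y yt, (a :: b :: rest).drop ((rest.length + 2) / 2) = y :: yt := by
      have hne : (a :: b :: rest).drop ((rest.length + 2) / 2) ≠ [] := by
        simp [List.drop_eq_nil_iff]; omega
      exact List.exists_cons_of_ne_nil hne
    have htake : (a :: b :: rest).take ((rest.length + 2) / 2)
        = a :: (b :: rest).take ((rest.length + 2) / 2 - 1) := by
      rcases Nat.exists_eq_add_of_le hm1 with ⟨k, hk⟩
      rw [hk, Nat.add_comm 1 k]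
      simp [List.take_succ_cons]
    have hsplit : b :: rest
        = (b :: rest).take ((rest.length + 2) / 2 - 1) ++ y :: yt := by
      have h0 := List.take_append_drop ((rest.length + 2) / 2) (a :: b :: rest)
      rw [htake, hdrop] at h0
      simp only [List.cons_append, List.cons.injEq] at h0
      exact h0.2.symm
    have hl := ihl a ((b :: rest).take ((rest.length + 2) / 2 - 1)) htake
    have hr := ihr y yt hdrop
    rw [pvSolve]
    simp only [hl, hr]
    conv_rhs => rw [hsplit]
    rw [pv_red_append _ pv_band_assoc, pv_red_append _ pv_bor_assoc, pv_red_append _ pv_bxor_assoc]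

-- ===== VERDICT (by name: the statement is the Claim_ definition above) =====
theorem perform_bitwise_operations_spec : Claim_equal_perform_bitwise_operations := by
  intro numbers _
  unfold Spec_perform_bitwise_operations perform_bitwise_operations perform_bitwise_operations_alt
  cases numbers with
  | nil => rfl
  | cons h t =>
    rw [pv_pvSolve_spec (h :: t) h t rfl]
    simp [PySem.List.slice_from_one, pv_fold3]
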